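-- pv_equiv track=rewrite | github.com/MI-Lab-study/algorithm | 2024-02-22/송지훈/퍼즐조각채우기.py | puzzle_to_matrix
-- ===== SOURCE A (Python) =====
-- def puzzle_to_matrix(puzzle):
--     x, y = zip(*puzzle)     # x는 puzzle의 모든 h들을 tuple로 y는 puzzle의 모든 w들을 tuple로
--     c, r = max(x) - min(x) + 1, max(y) - min(y) + 1
--     table = [[0] * r for _ in range(c)]
--
--     for i, j in puzzle:
--         i, j = i - min(x), j - min(y)
--         table[i][j] = 1
--
--     return table
-- ===== SOURCE B (Python) =====
-- def puzzle_to_matrix(puzzle):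
--     i0, j0 = puzzle[0]
--     mnx, mxx, mny, mxy = i0, i0, j0, j0
--     for i, j in puzzle:
--         if i < mnx: mnx = i
--         if i > mxx: mxx = i
--         if j < mny: mny = j
--         if j > mxy: mxy = j
--     out = []
--     for i in range(mnx, mxx + 1):
--         cols = {j for x, j in puzzle if x == i}
--         out.append([1 if j in cols else 0 for j in range(mny, mxy + 1)])
--     return out
-- ===== Notes on version B (the rewrite author's own statement) =====
-- stated objective: alternative
-- what changed: A unzips the list, takes min/max with builtins, preallocates a zero matrix and mutates it per puzzle cell; B computes all four bounds in one running-min/max loop, then emits each row by filtering the puzzle for that row's x, collecting its columns into a set and testing membership across the column range (no preallocated matrix, no mutation, and emission ranges over actual coordinates instead of shifted indices).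
import Mathlib
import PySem

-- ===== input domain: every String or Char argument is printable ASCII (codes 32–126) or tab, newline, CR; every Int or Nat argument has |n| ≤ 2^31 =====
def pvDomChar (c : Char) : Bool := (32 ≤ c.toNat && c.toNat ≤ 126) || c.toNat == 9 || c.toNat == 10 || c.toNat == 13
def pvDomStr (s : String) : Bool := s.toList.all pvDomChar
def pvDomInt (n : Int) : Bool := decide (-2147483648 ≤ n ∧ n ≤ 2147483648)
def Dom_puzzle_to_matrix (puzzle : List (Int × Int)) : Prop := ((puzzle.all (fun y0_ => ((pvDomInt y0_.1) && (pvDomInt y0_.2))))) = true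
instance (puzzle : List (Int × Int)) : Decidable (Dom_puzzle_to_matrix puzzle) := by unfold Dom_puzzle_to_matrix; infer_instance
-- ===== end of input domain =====

-- B replaces A's unzip/min-max/preallocate-and-mutate scheme by one running-bounds loop
-- followed by per-row emission (filter the puzzle for the row, test column membership);
-- a genuinely different construction of the same matrix (alternative, not faster).

-- ===== PORT A =====
-- A: unzip, compute extents with min/max, build zero table, then table[i-minx][j-miny] = 1 per piece.
def puzzle_to_matrix (puzzle : List (Int × Int)) : List (List Int) :=
  let x := puzzle.map Prod.fst
  let y := puzzle.map Prod.snd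
  let minx := (PySem.List.min? x (fun v => v)).getD 0
  let miny := (PySem.List.min? y (fun v => v)).getD 0
  let c := (PySem.List.max? x (fun v => v)).getD 0 - minx + 1
  let r := (PySem.List.max? y (fun v => v)).getD 0 - miny + 1
  let table := List.replicate c.toNat (List.replicate r.toNat (0 : Int))
  puzzle.foldl
    (fun t p => t.modify (p.1 - minx).toNat (fun row => row.set (p.2 - miny).toNat 1))
    table

-- ===== PORT B =====
-- one step of B's running-bounds loop: the four 'if' updates, in order
def pvBounds1 (s : Int × Int × Int × Int) (p : Int × Int) : Int × Int × Int × Int :=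
  let s := if p.1 < s.1 then (p.1, s.2.1, s.2.2.1, s.2.2.2) else s
  let s := if p.1 > s.2.1 then (s.1, p.1, s.2.2.1, s.2.2.2) else s
  let s := if p.2 < s.2.2.1 then (s.1, s.2.1, p.2, s.2.2.2) else s
  if p.2 > s.2.2.2 then (s.1, s.2.1, s.2.2.1, p.2) else s

-- B: running min/max bounds in one fold, then emit each row over the real coordinate
-- ranges, testing membership of the column in the set of columns of that row.
-- (Python B raises IndexError at puzzle[0] on the empty list; headD's default is never
-- reached inside Pre_.)
def puzzle_to_matrix_alt (puzzle : List (Int × Int)) : List (List Int) :=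
  let p0 := puzzle.headD (0, 0)
  let b := puzzle.foldl pvBounds1 (p0.1, p0.1, p0.2, p0.2)
  (PySem.List.pyRange b.1 (b.2.1 + 1) 1).map (fun i =>
    let cols := PySem.Set.ofList ((puzzle.filter (fun q => q.1 == i)).map Prod.snd)
    (PySem.List.pyRange b.2.2.1 (b.2.2.2 + 1) 1).map (fun j =>
      if j ∈ cols then (1 : Int) else 0))

-- ===== PRECONDITION & SPEC =====
-- Pre_ excludes only the empty list, on which Python A raises ValueError at 'x, y = zip(*puzzle)'
-- (and B raises IndexError at 'puzzle[0]').
def Pre_puzzle_to_matrix (puzzle : List (Int × Int)) : Prop := puzzle ≠ []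
instance (puzzle : List (Int × Int)) : Decidable (Pre_puzzle_to_matrix puzzle) := by unfold Pre_puzzle_to_matrix; infer_instance
def pvWitness_puzzle_to_matrix : (List (Int × Int)) := [(2, 3), (3, 3), (3, 5)]

def Spec_puzzle_to_matrix (puzzle : List (Int × Int)) (out : List (List Int)) : Prop := out = puzzle_to_matrix_alt puzzle
instance (puzzle : List (Int × Int)) (out : List (List Int)) : Decidable (Spec_puzzle_to_matrix puzzle out) := by unfold Spec_puzzle_to_matrix; infer_instance

-- ===== CLAIM (what is proved, stated in full; the proofs are below) =====
def Claim_equal_puzzle_to_matrix : Prop := ∀ (puzzle : List (Int × Int)), Dom_puzzle_to_matrix puzzle → Pre_puzzle_to_matrix puzzle → Spec_puzzle_to_matrix puzzle (puzzle_to_matrix puzzle)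

-- ===== LEMMAS AND PROOFS =====

-- one step of A's loop
def pvStep (minx miny : Int) (t : List (List Int)) (p : Int × Int) : List (List Int) :=
  t.modify (p.1 - minx).toNat (fun row => row.set (p.2 - miny).toNat 1)

theorem pvStep_length (minx miny : Int) (t : List (List Int)) (p : Int × Int) :
    (pvStep minx miny t p).length = t.length := by
  simp [pvStep, List.length_modify]

theorem pvStep_row_length (minx miny : Int) (R : Nat) (t : List (List Int)) (p : Int × Int)
    (ht : ∀ k (h : k < t.length), t[k].length = R) :
    ∀ k (h : k < (pvStep minx miny t p).length), (pvStep minx miny t p)[k].length = R := by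
  intro k h
  have hk : k < t.length := by rw [← pvStep_length minx miny t p]; exact h
  simp only [pvStep, List.getElem_modify]
  split_ifs
  · rw [List.length_set]; exact ht k hk
  · exact ht k hk

theorem pvFold_length (minx miny : Int) (L : List (Int × Int)) (t : List (List Int)) :
    (L.foldl (pvStep minx miny) t).length = t.length := by
  induction L generalizing t with
  | nil => rfl
  | cons p L ih => simp only [List.foldl]; rw [ih, pvStep_length]

theorem pvFold_row_length (minx miny : Int) (R : Nat) (L : List (Int × Int))
    (t : List (List Int)) (ht : ∀ k (h : k < t.length), t[k].length = R) :
    ∀ k (h : k < (L.foldl (pvStep minx miny) t).length),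
      (L.foldl (pvStep minx miny) t)[k].length = R := by
  induction L generalizing t with
  | nil => exact ht
  | cons p L ih => exact ih (pvStep minx miny t p) (pvStep_row_length minx miny R t p ht)

theorem pvFold_entry (minx miny : Int) (R : Nat) (L : List (Int × Int))
    (t : List (List Int)) (ht : ∀ k (h : k < t.length), t[k].length = R)
    (i j : Nat) (hjR : j < R)
    (hi' : i < (L.foldl (pvStep minx miny) t).length)
    (hj' : j < (L.foldl (pvStep minx miny) t)[i].length)
    (hit : i < t.length) (hjt : j < t[i].length) :
    (L.foldl (pvStep minx miny) t)[i][j] =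
      if (∃ p ∈ L, (p.1 - minx).toNat = i ∧ (p.2 - miny).toNat = j) then 1 else t[i][j] := by
  induction L generalizing t with
  | nil => simp
  | cons p L ih =>
      have ht' := pvStep_row_length minx miny R t p ht
      have hlen := pvStep_length minx miny t p
      have hit' : i < (pvStep minx miny t p).length := by rw [hlen]; exact hit
      have hjt' : j < (pvStep minx miny t p)[i].length := by rw [ht' i hit']; exact hjR
      have hstep : (pvStep minx miny t p)[i][j] =
          if ((p.1 - minx).toNat = i ∧ (p.2 - miny).toNat = j) then 1 else t[i][j] := by
        simp only [pvStep, List.getElem_modify]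
        by_cases h1 : (p.1 - minx).toNat = i
        · by_cases h2 : (p.2 - miny).toNat = j
          · simp [h1, h2]
          · simp [h1, h2]
        · simp [h1]
      have main := ih (pvStep minx miny t p) ht'
        (by simpa [List.foldl] using hi') (by simpa [List.foldl] using hj') hit' hjt'
      simp only [List.foldl_cons]
      refine main.trans ?_
      rw [hstep]
      by_cases hL : ∃ q ∈ L, (q.1 - minx).toNat = i ∧ (q.2 - miny).toNat = j
      · rw [if_pos hL, if_pos ⟨hL.choose, List.mem_cons_of_mem _ hL.choose_spec.1, hL.choose_spec.2⟩]
      · rw [if_neg hL]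
        by_cases hp : (p.1 - minx).toNat = i ∧ (p.2 - miny).toNat = j
        · rw [if_pos hp, if_pos ⟨p, List.mem_cons_self .., hp⟩]
        · rw [if_neg hp, if_neg]
          rintro ⟨q, hq, hq2⟩
          rcases List.mem_cons.1 hq with rfl | hq'
          · exact hp hq2
          · exact hL ⟨q, hq', hq2⟩

-- B's one-pass bounds fold is the tuple of the four componentwise min/max folds
theorem pvBounds1_eq (s : Int × Int × Int × Int) (p : Int × Int) :
    pvBounds1 s p = (min s.1 p.1, max s.2.1 p.1, min s.2.2.1 p.2, max s.2.2.2 p.2) := by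
  obtain ⟨a, b, c, d⟩ := s
  simp only [pvBounds1]
  split_ifs <;> simp_all <;> omega

theorem pvBoundsFold_eq (L : List (Int × Int)) (s : Int × Int × Int × Int) :
    L.foldl pvBounds1 s =
      ((L.map Prod.fst).foldl min s.1, (L.map Prod.fst).foldl max s.2.1,
       (L.map Prod.snd).foldl min s.2.2.1, (L.map Prod.snd).foldl max s.2.2.2) := by
  induction L generalizing s with
  | nil => rfl
  | cons p L ih => simp only [List.foldl_cons, List.map_cons, pvBounds1_eq, ih]

-- ===== VERDICT =====
theorem puzzle_to_matrix_spec : Claim_equal_puzzle_to_matrix := by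
  intro puzzle _ hne
  unfold Spec_puzzle_to_matrix
  obtain ⟨p0, rest, rfl⟩ : ∃ p r, puzzle = p :: r := by
    cases puzzle with
    | nil => exact absurd rfl hne
    | cons a l => exact ⟨a, l, rfl⟩
  simp only [puzzle_to_matrix, puzzle_to_matrix_alt, List.headD_cons]
  set puzzle := p0 :: rest with hpz
  -- identify the two extents computations
  have hmin1 : PySem.List.min? (puzzle.map Prod.fst) (fun v => v) =
      some ((rest.map Prod.fst).foldl min p0.1) := by
    rw [hpz, List.map_cons, PySem.List.min?_id_cons]
  have hmax1 : PySem.List.max? (puzzle.map Prod.fst) (fun v => v) =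
      some ((rest.map Prod.fst).foldl max p0.1) := by
    rw [hpz, List.map_cons, PySem.List.max?_id_cons]
  have hmin2 : PySem.List.min? (puzzle.map Prod.snd) (fun v => v) =
      some ((rest.map Prod.snd).foldl min p0.2) := by
    rw [hpz, List.map_cons, PySem.List.min?_id_cons]
  have hmax2 : PySem.List.max? (puzzle.map Prod.snd) (fun v => v) =
      some ((rest.map Prod.snd).foldl max p0.2) := by
    rw [hpz, List.map_cons, PySem.List.max?_id_cons]
  set mx := (rest.map Prod.fst).foldl min p0.1 with hmxdef
  set Mx := (rest.map Prod.fst).foldl max p0.1 with hMxdef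
  set my := (rest.map Prod.snd).foldl min p0.2 with hmydef
  set My := (rest.map Prod.snd).foldl max p0.2 with hMydef
  have hbfold : puzzle.foldl pvBounds1 (p0.1, p0.1, p0.2, p0.2) = (mx, Mx, my, My) := by
    rw [hpz, List.foldl_cons, pvBounds1_eq, pvBoundsFold_eq]
    simp only [min_self, max_self]
    rfl
  rw [hmin1, hmax1, hmin2, hmax2, hbfold]
  simp only [Option.getD_some]
  have hbx : ∀ p ∈ puzzle, mx ≤ p.1 ∧ p.1 ≤ Mx := fun p hp =>
    ⟨PySem.List.min?_isMin (hmxdef ▸ hmin1) _ (List.mem_map_of_mem hp),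
     PySem.List.max?_isMax (hMxdef ▸ hmax1) _ (List.mem_map_of_mem hp)⟩
  have hby : ∀ p ∈ puzzle, my ≤ p.2 ∧ p.2 ≤ My := fun p hp =>
    ⟨PySem.List.min?_isMin (hmydef ▸ hmin2) _ (List.mem_map_of_mem hp),
     PySem.List.max?_isMax (hMydef ▸ hmax2) _ (List.mem_map_of_mem hp)⟩
  have hmxMx : mx ≤ Mx := le_trans (hbx p0 (List.mem_cons_self ..)).1 (hbx p0 (List.mem_cons_self ..)).2
  have hmyMy : my ≤ My := le_trans (hby p0 (List.mem_cons_self ..)).1 (hby p0 (List.mem_cons_self ..)).2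
  set C := (Mx - mx + 1).toNat with hC
  set R := (My - my + 1).toNat with hR
  set t0 := List.replicate C (List.replicate R (0 : Int)) with ht0
  have ht0len : t0.length = C := by rw [ht0, List.length_replicate]
  have ht0rows : ∀ k (h : k < t0.length), t0[k].length = R := by
    intro k h; simp [ht0]
  rw [show (fun (t : List (List Int)) (p : Int × Int) =>
        t.modify (p.1 - mx).toNat fun row => row.set (p.2 - my).toNat 1) = pvStep mx my from rfl]
  have hlen : (puzzle.foldl (pvStep mx my) t0).length = C := by
    rw [pvFold_length, ht0len]
  have hrows := pvFold_row_length mx my R puzzle t0 ht0rows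
  apply List.ext_getElem
  · rw [hlen, List.length_map, PySem.List.length_pyRange_one]
    omega
  intro i hi hi'
  have hiC : i < C := by rw [← hlen]; exact hi
  have hiC' : i < (PySem.List.pyRange mx (Mx + 1) 1).length := by
    rw [PySem.List.length_pyRange_one]; omega
  apply List.ext_getElem
  · rw [hrows i hi]
    simp only [List.getElem_map, List.length_map, PySem.List.length_pyRange_one]
    omega
  intro j hj hj'
  have hjR : j < R := by rw [← hrows i hi]; exact hj
  have ht0i : i < t0.length := by rw [ht0len]; exact hiC
  have ht0ij : j < t0[i].length := by rw [ht0rows i ht0i]; exact hjR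
  rw [pvFold_entry mx my R puzzle t0 ht0rows i j hjR hi hj ht0i ht0ij]
  have hjR' : j < (PySem.List.pyRange my (My + 1) 1).length := by
    rw [PySem.List.length_pyRange_one]; omega
  have hB : ((PySem.List.pyRange mx (Mx + 1) 1).map (fun i =>
        (PySem.List.pyRange my (My + 1) 1).map (fun j =>
          if j ∈ PySem.Set.ofList ((puzzle.filter (fun q => q.1 == i)).map Prod.snd)
          then (1 : Int) else 0)))[i][j]'hj' =
      if ((my + (j : Int)) ∈ PySem.Set.ofList
            ((puzzle.filter (fun q => q.1 == mx + (i : Int))).map Prod.snd))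
      then (1 : Int) else 0 := by
    simp only [List.getElem_map, PySem.List.getElem_pyRange_one]
  refine Eq.trans ?_ hB.symm
  have hmem : ((my + (j : Int)) ∈ PySem.Set.ofList
        ((puzzle.filter (fun q => q.1 == mx + (i : Int))).map Prod.snd)) ↔
      ∃ q ∈ puzzle, q.1 = mx + (i : Int) ∧ q.2 = my + (j : Int) := by
    rw [PySem.Set.mem_ofList]
    simp only [List.mem_map, List.mem_filter, beq_iff_eq]
    constructor
    · rintro ⟨q, ⟨hq, hq1⟩, hq2⟩; exact ⟨q, hq, hq1, hq2⟩
    · rintro ⟨q, hq, hq1, hq2⟩; exact ⟨q, ⟨hq, hq1⟩, hq2⟩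
  by_cases hc : ∃ p ∈ puzzle, (p.1 - mx).toNat = i ∧ (p.2 - my).toNat = j
  · obtain ⟨p, hp, h1, h2⟩ := hc
    have hb1 := (hbx p hp).1
    have hb2 := (hby p hp).1
    rw [if_pos ⟨p, hp, h1, h2⟩, if_pos (hmem.2 ⟨p, hp, by omega, by omega⟩)]
  · rw [if_neg hc, if_neg]
    · simp [ht0]
    · intro hmem'
      obtain ⟨q, hq, hq1, hq2⟩ := hmem.1 hmem'
      exact hc ⟨q, hq, by omega, by omega⟩
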